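-- pv_equiv track=rewrite | github.com/djacobs/Pinwheel | src/pinwheel/discord/embeds.py | _compute_margin_label
-- ===== SOURCE A (Python) =====
-- def _compute_margin_label(
--     game_data: dict[str, object],
--     all_games: list[dict[str, object]],
-- ) -> str:
--     """Compute margin significance label for a game.
--
--     Returns a label like "Closest game of the season" or "Biggest blowout
--     this season" if this game's margin is the most extreme seen so far.
--     Returns empty string if the margin is unremarkable.
--     """
--     home_score = int(game_data.get("home_score", 0))
--     away_score = int(game_data.get("away_score", 0))
--     this_margin = abs(home_score - away_score)
--
--     if len(all_games) < 2:
--         # Only one game played — no basis for comparison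
--         return ""
--
--     # Compute all margins from the season (including this game)
--     margins: list[int] = []
--     for g in all_games:
--         hs = int(g.get("home_score", 0))
--         aws = int(g.get("away_score", 0))
--         margins.append(abs(hs - aws))
--
--     if not margins:
--         return ""
--
--     min_margin = min(margins)
--     max_margin = max(margins)
--
--     # Only label if this game IS the extreme (not tied with many others)
--     if this_margin == min_margin and this_margin != max_margin:
--         count_at_min = margins.count(min_margin)
--         if count_at_min <= 2:
--             return "Closest game of the season"
--
--     if this_margin == max_margin and this_margin != min_margin:
--         count_at_max = margins.count(max_margin)
--         if count_at_max <= 2: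
--             return "Biggest blowout of the season"
--
--     return ""
-- ===== SOURCE B (Python) =====
-- def _compute_margin_label(game_data, all_games):
--     """Single-pass re-implementation: running min/max margins with counters."""
--     this_margin = abs(int(game_data.get("home_score", 0)) - int(game_data.get("away_score", 0)))
--     if len(all_games) < 2:
--         return ""
--     min_margin = max_margin = None
--     count_at_min = count_at_max = 0
--     for g in all_games:
--         m = abs(int(g.get("home_score", 0)) - int(g.get("away_score", 0)))
--         if min_margin is None or m < min_margin:
--             min_margin, count_at_min = m, 1
--         elif m == min_margin:
--             count_at_min += 1
--         if max_margin is None or m > max_margin: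
--             max_margin, count_at_max = m, 1
--         elif m == max_margin:
--             count_at_max += 1
--     if this_margin == min_margin and min_margin != max_margin and count_at_min <= 2:
--         return "Closest game of the season"
--     if this_margin == max_margin and max_margin != min_margin and count_at_max <= 2:
--         return "Biggest blowout of the season"
--     return ""
-- ===== Notes on version B (the rewrite author's own statement) =====
-- stated objective: alternative
-- what changed: Replaces the build-a-margins-list-then-min/max/count passes (four traversals) by one loop over all_games maintaining running min/max margins with reset-on-new-extreme counters.
import Mathlib
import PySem

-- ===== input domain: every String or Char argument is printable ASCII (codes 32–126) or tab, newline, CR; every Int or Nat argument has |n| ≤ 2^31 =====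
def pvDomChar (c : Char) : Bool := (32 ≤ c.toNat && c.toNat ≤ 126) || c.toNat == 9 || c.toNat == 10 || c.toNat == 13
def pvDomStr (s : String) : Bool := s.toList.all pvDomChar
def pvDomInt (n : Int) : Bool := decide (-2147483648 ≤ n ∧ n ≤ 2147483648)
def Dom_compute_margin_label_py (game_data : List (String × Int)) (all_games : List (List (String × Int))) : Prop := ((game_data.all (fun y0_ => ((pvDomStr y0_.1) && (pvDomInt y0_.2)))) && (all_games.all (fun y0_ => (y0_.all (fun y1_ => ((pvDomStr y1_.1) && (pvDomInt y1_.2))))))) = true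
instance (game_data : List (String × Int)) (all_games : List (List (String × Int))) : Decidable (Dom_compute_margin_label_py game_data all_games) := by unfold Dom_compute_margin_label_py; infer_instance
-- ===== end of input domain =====

-- B replaces A's build-a-margins-list-then-min/max/count passes by one loop with running
-- min/max and reset-on-new-extreme counters (objective: alternative, same O(n) cost).

-- ===== PORT A =====
def compute_margin_label_py (game_data : List (String × Int)) (all_games : List (List (String × Int))) : String :=
  let this_margin := |((PySem.Dict.mk game_data).getD "home_score" 0) - ((PySem.Dict.mk game_data).getD "away_score" 0)|
  if all_games.length < 2 then ""
  else
    let margins : List Int := all_games.foldl (fun acc g => acc ++ [|((PySem.Dict.mk g).getD "home_score" 0) - ((PySem.Dict.mk g).getD "away_score" 0)|]) []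
    if margins = [] then ""
    else
      match PySem.List.min? margins (fun x => x), PySem.List.max? margins (fun x => x) with
      | some min_margin, some max_margin =>
        if this_margin = min_margin ∧ this_margin ≠ max_margin ∧ PySem.List.count margins min_margin ≤ 2 then
          "Closest game of the season"
        else if this_margin = max_margin ∧ this_margin ≠ min_margin ∧ PySem.List.count margins max_margin ≤ 2 then
          "Biggest blowout of the season"
        else ""
      | _, _ => ""

-- ===== PORT B =====
-- loop body of Source B: update (min_margin, max_margin, count_at_min, count_at_max) with game g
def pvStepB (st : Option Int × Option Int × Int × Int) (g : List (String × Int)) :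
    Option Int × Option Int × Int × Int :=
  let m := |((PySem.Dict.mk g).getD "home_score" 0) - ((PySem.Dict.mk g).getD "away_score" 0)|
  let mnc : Option Int × Int :=
    match st.1 with
    | none => (some m, 1)
    | some mn => if m < mn then (some m, 1) else if m = mn then (some mn, st.2.2.1 + 1) else (some mn, st.2.2.1)
  let mxc : Option Int × Int :=
    match st.2.1 with
    | none => (some m, 1)
    | some mx => if m > mx then (some m, 1) else if m = mx then (some mx, st.2.2.2 + 1) else (some mx, st.2.2.2)
  (mnc.1, mxc.1, mnc.2, mxc.2)

def compute_margin_label_py_alt (game_data : List (String × Int)) (all_games : List (List (String × Int))) : String :=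
  let this_margin := |((PySem.Dict.mk game_data).getD "home_score" 0) - ((PySem.Dict.mk game_data).getD "away_score" 0)|
  if all_games.length < 2 then ""
  else
    let r := all_games.foldl pvStepB (none, none, 0, 0)
    match r.1 with
    | none => ""   -- int == None is False in Python: no label
    | some mn =>
      match r.2.1 with
      | none => ""
      | some mx =>
        if this_margin = mn ∧ mn ≠ mx ∧ r.2.2.1 ≤ 2 then "Closest game of the season"
        else if this_margin = mx ∧ mx ≠ mn ∧ r.2.2.2 ≤ 2 then "Biggest blowout of the season"
        else ""

-- ===== PRECONDITION & SPEC =====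
def Spec_compute_margin_label_py (game_data : List (String × Int)) (all_games : List (List (String × Int))) (out : String) : Prop := out = compute_margin_label_py_alt game_data all_games
instance (game_data : List (String × Int)) (all_games : List (List (String × Int))) (out : String) : Decidable (Spec_compute_margin_label_py game_data all_games out) := by unfold Spec_compute_margin_label_py; infer_instance

-- ===== CLAIM (what is proved, stated in full; the proofs are below) =====
def Claim_equal_compute_margin_label_py : Prop := ∀ (game_data : List (String × Int)) (all_games : List (List (String × Int))), Dom_compute_margin_label_py game_data all_games → Spec_compute_margin_label_py game_data all_games (compute_margin_label_py game_data all_games)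

-- ===== LEMMAS AND PROOFS =====

-- the per-game margin both programs compute inline
def pvMargin (g : List (String × Int)) : Int :=
  |((PySem.Dict.mk g).getD "home_score" 0) - ((PySem.Dict.mk g).getD "away_score" 0)|

-- pvStepB viewed on the margin values
def pvStepM (st : Option Int × Option Int × Int × Int) (m : Int) :
    Option Int × Option Int × Int × Int :=
  let mnc : Option Int × Int :=
    match st.1 with
    | none => (some m, 1)
    | some mn => if m < mn then (some m, 1) else if m = mn then (some mn, st.2.2.1 + 1) else (some mn, st.2.2.1)
  let mxc : Option Int × Int :=
    match st.2.1 with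
    | none => (some m, 1)
    | some mx => if m > mx then (some m, 1) else if m = mx then (some mx, st.2.2.2 + 1) else (some mx, st.2.2.2)
  (mnc.1, mxc.1, mnc.2, mxc.2)

theorem foldl_min_le (t : List Int) (x : Int) : t.foldl min x ≤ x := by
  induction t generalizing x with
  | nil => simp
  | cons a t ih => simpa using le_trans (ih (min x a)) (min_le_left x a)

theorem le_foldl_max_int (t : List Int) (x : Int) : x ≤ t.foldl max x := by
  induction t generalizing x with
  | nil => simp
  | cons a t ih => simpa using le_trans (le_max_left x a) (ih (max x a))

-- the two independent halves of the running state
def pvStepMin (p : Int × Int) (m : Int) : Int × Int :=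
  if m < p.1 then (m, 1) else if m = p.1 then (p.1, p.2 + 1) else p

def pvStepMax (p : Int × Int) (m : Int) : Int × Int :=
  if m > p.1 then (m, 1) else if m = p.1 then (p.1, p.2 + 1) else p

theorem pvStepM_decomp (t : List Int) (mn mx a b : Int) :
    t.foldl pvStepM (some mn, some mx, a, b) =
      (some (t.foldl pvStepMin (mn, a)).1, some (t.foldl pvStepMax (mx, b)).1,
       (t.foldl pvStepMin (mn, a)).2, (t.foldl pvStepMax (mx, b)).2) := by
  induction t generalizing mn mx a b with
  | nil => rfl
  | cons m t ih =>
    simp only [List.foldl_cons]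
    have hstep : pvStepM (some mn, some mx, a, b) m =
        (some (pvStepMin (mn, a) m).1, some (pvStepMax (mx, b) m).1,
         (pvStepMin (mn, a) m).2, (pvStepMax (mx, b) m).2) := by
      simp only [pvStepM, pvStepMin, pvStepMax]
      split_ifs <;> rfl
    rw [hstep]
    rcases hmn : pvStepMin (mn, a) m with ⟨x1, x2⟩
    rcases hmx : pvStepMax (mx, b) m with ⟨y1, y2⟩
    simpa [hmn, hmx] using ih x1 y1 x2 y2

theorem pvStepMin_spec (t : List Int) (mn c : Int) :
    t.foldl pvStepMin (mn, c) =
      (t.foldl min mn, (if t.foldl min mn = mn then c else 0) + (t.count (t.foldl min mn) : Int)) := by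
  induction t generalizing mn c with
  | nil => simp
  | cons m t ih =>
    simp only [List.foldl_cons, List.count_cons]
    rcases lt_trichotomy m mn with h | h | h
    · have hs : pvStepMin (mn, c) m = (m, 1) := by simp [pvStepMin, h]
      have hm : min mn m = m := min_eq_right h.le
      have hle : t.foldl min m ≤ m := foldl_min_le t m
      have hne : ¬ t.foldl min m = mn := by omega
      rw [hs]; simp only [hm]; rw [ih m 1]
      simp only [hne, beq_iff_eq, Prod.mk.injEq, true_and]
      split_ifs <;> (try contradiction) <;> push_cast <;> omega
    · subst h
      have hs : pvStepMin (m, c) m = (m, c + 1) := by simp [pvStepMin]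
      have hm : min m m = m := min_self m
      rw [hs]; simp only [hm]; rw [ih m (c + 1)]
      simp only [beq_iff_eq, Prod.mk.injEq, true_and]
      split_ifs <;> push_cast <;> omega
    · have hs : pvStepMin (mn, c) m = (mn, c) := by
        simp [pvStepMin, not_lt.2 h.le, h.ne']
      have hm : min mn m = mn := min_eq_left h.le
      have hle : t.foldl min mn ≤ mn := foldl_min_le t mn
      have hne : ¬ t.foldl min mn = m := by omega
      rw [hs]; simp only [hm]; rw [ih mn c]
      simp only [beq_iff_eq, Prod.mk.injEq, true_and]
      split_ifs <;> push_cast <;> omega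

theorem pvStepMax_spec (t : List Int) (mx c : Int) :
    t.foldl pvStepMax (mx, c) =
      (t.foldl max mx, (if t.foldl max mx = mx then c else 0) + (t.count (t.foldl max mx) : Int)) := by
  induction t generalizing mx c with
  | nil => simp
  | cons m t ih =>
    simp only [List.foldl_cons, List.count_cons]
    rcases lt_trichotomy m mx with h | h | h
    · have hs : pvStepMax (mx, c) m = (mx, c) := by
        simp [pvStepMax, not_lt.2 h.le, h.ne]
      have hm : max mx m = mx := max_eq_left h.le
      have hle : mx ≤ t.foldl max mx := le_foldl_max_int t mx
      have hne : ¬ t.foldl max mx = m := by omega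
      rw [hs]; simp only [hm]; rw [ih mx c]
      simp only [beq_iff_eq, Prod.mk.injEq, true_and]
      split_ifs <;> push_cast <;> omega
    · subst h
      have hs : pvStepMax (m, c) m = (m, c + 1) := by simp [pvStepMax]
      have hm : max m m = m := max_self m
      rw [hs]; simp only [hm]; rw [ih m (c + 1)]
      simp only [beq_iff_eq, Prod.mk.injEq, true_and]
      split_ifs <;> push_cast <;> omega
    · have hs : pvStepMax (mx, c) m = (m, 1) := by simp [pvStepMax, h]
      have hm : max mx m = m := max_eq_right h.le
      have hle : m ≤ t.foldl max m := le_foldl_max_int t m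
      have hne : ¬ t.foldl max m = mx := by omega
      rw [hs]; simp only [hm]; rw [ih m 1]
      simp only [hne, beq_iff_eq, Prod.mk.injEq, true_and]
      split_ifs <;> (try contradiction) <;> push_cast <;> omega

theorem pvMainLemma (q m : Int) (t : List Int) :
    (match PySem.List.min? (m :: t) (fun x => x), PySem.List.max? (m :: t) (fun x => x) with
     | some min_margin, some max_margin =>
       if q = min_margin ∧ q ≠ max_margin ∧ PySem.List.count (m :: t) min_margin ≤ 2 then
         "Closest game of the season"
       else if q = max_margin ∧ q ≠ min_margin ∧ PySem.List.count (m :: t) max_margin ≤ 2 then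
         "Biggest blowout of the season"
       else ""
     | _, _ => "") =
    (match (List.foldl pvStepM (none, none, 0, 0) (m :: t)).1 with
     | none => ""
     | some mn =>
       match (List.foldl pvStepM (none, none, 0, 0) (m :: t)).2.1 with
       | none => ""
       | some mx =>
         if q = mn ∧ mn ≠ mx ∧ (List.foldl pvStepM (none, none, 0, 0) (m :: t)).2.2.1 ≤ 2 then
           "Closest game of the season"
         else if q = mx ∧ mx ≠ mn ∧ (List.foldl pvStepM (none, none, 0, 0) (m :: t)).2.2.2 ≤ 2 then
           "Biggest blowout of the season"
         else "") := by
  have hfold : List.foldl pvStepM (none, none, 0, 0) (m :: t) =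
      (some (t.foldl min m),
       some (t.foldl max m),
       (if t.foldl min m = m then (1:Int) else 0) + ((t.count (t.foldl min m)) : Int),
       (if t.foldl max m = m then (1:Int) else 0) + ((t.count (t.foldl max m)) : Int)) := by
    rw [show List.foldl pvStepM (none, none, 0, 0) (m :: t)
          = t.foldl pvStepM (some m, some m, 1, 1) from rfl,
        pvStepM_decomp, pvStepMin_spec, pvStepMax_spec]
  simp only [hfold, PySem.List.min?_id_cons, PySem.List.max?_id_cons]
  set M := t.foldl min m with hM
  set X := t.foldl max m with hX
  have hcmin : ∀ v : Int, (PySem.List.count (m :: t) v ≤ 2) ↔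
      ((if v = m then (1:Int) else 0) + (t.count v : Int) ≤ 2) := by
    intro v
    rw [PySem.List.count_eq]
    simp only [List.count_cons, beq_iff_eq]
    split_ifs <;> push_cast <;> omega
  have h1 : (q = M ∧ q ≠ X ∧ PySem.List.count (m :: t) M ≤ 2) ↔
      (q = M ∧ M ≠ X ∧ (if M = m then (1:Int) else 0) + (t.count M : Int) ≤ 2) := by
    constructor
    · rintro ⟨rfl, h2, h3⟩; exact ⟨rfl, h2, (hcmin _).1 h3⟩
    · rintro ⟨rfl, h2, h3⟩; exact ⟨rfl, h2, (hcmin _).2 h3⟩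
  have h2 : (q = X ∧ q ≠ M ∧ PySem.List.count (m :: t) X ≤ 2) ↔
      (q = X ∧ X ≠ M ∧ (if X = m then (1:Int) else 0) + (t.count X : Int) ≤ 2) := by
    constructor
    · rintro ⟨rfl, h2, h3⟩; exact ⟨rfl, h2, (hcmin _).1 h3⟩
    · rintro ⟨rfl, h2, h3⟩; exact ⟨rfl, h2, (hcmin _).2 h3⟩
  exact if_congr h1 rfl (if_congr h2 rfl rfl)

-- ===== VERDICT (by name: the statement is the Claim_ definition above) =====
theorem compute_margin_label_py_spec : Claim_equal_compute_margin_label_py := by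
  intro gd ag _
  unfold Spec_compute_margin_label_py
  match ag with
  | [] => rfl
  | [g] => rfl
  | g1 :: g2 :: rest =>
    unfold compute_margin_label_py compute_margin_label_py_alt
    have hlen : ¬ (g1 :: g2 :: rest).length < 2 := by simp
    simp only [if_neg hlen]
    -- A's margins list is the map of the per-game margin; B's fold over games is a fold over the margins
    rw [PySem.List.foldl_append_singleton_eq_map]
    have hfun : (fun (g : List (String × Int)) =>
        |((PySem.Dict.mk g).getD "home_score" 0) - ((PySem.Dict.mk g).getD "away_score" 0)|) = pvMargin := rfl
    rw [hfun]
    rw [show pvStepB = fun st g => pvStepM st (pvMargin g) from rfl, ← List.foldl_map]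
    simp only [List.map_cons, List.nil_append]
    rw [if_neg (List.cons_ne_nil (pvMargin g1) (pvMargin g2 :: List.map pvMargin rest))]
    exact pvMainLemma (pvMargin gd) (pvMargin g1) (pvMargin g2 :: List.map pvMargin rest)
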